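-- pv_equiv track=rewrite | github.com/bt2901/dekaheptoid_beaver | infer_rules.py | select_best_action
-- ===== SOURCE A (Python) =====
-- def select_best_action(local_matches, tm_name):
--     local_matches_pretty = local_matches
--
--     if tm_name == '1RB---_0LC1RF_1RA1LD_0LE1RF_0LC1LE_0RD0RA':
--         if 'apply_halve_and_increment o apply_excluding_increment' in local_matches:
--             return 'apply_halve_and_increment o apply_excluding_increment'
--
--     if len(local_matches) > 1:
--             for priority_rule in [
--                     'apply_init', 'apply_increment', 'apply_zero', 'apply_zero_variant',
--                     'apply_overflow o apply_zero_increment',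
--                     'apply_halve o apply_increment', 'apply_halve o apply_zero',
--                     'apply_zero_increment', 'apply_excluding_increment', 'apply_shallow_increment',
--                     # 'apply_zero_D' == apply_unsafe_increment_1N o apply_overflow
--                     'apply_zero_D', 'apply_halve o apply_zero_D',
--                     'apply_halve_and_increment o apply_unsafe_increment_1N', 'apply_halve o apply_weird_overflow',
--                     'apply_halve o apply_weird_double_zero', 'apply_halve_and_increment o apply_increment'
--                 ]:
--                 if priority_rule in local_matches:
--                     return priority_rule
--             return local_matches[0]
-- ===== SOURCE B (Python) =====
-- _PRIORITY = [
--     'apply_init', 'apply_increment', 'apply_zero', 'apply_zero_variant',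
--     'apply_overflow o apply_zero_increment',
--     'apply_halve o apply_increment', 'apply_halve o apply_zero',
--     'apply_zero_increment', 'apply_excluding_increment', 'apply_shallow_increment',
--     'apply_zero_D', 'apply_halve o apply_zero_D',
--     'apply_halve_and_increment o apply_unsafe_increment_1N', 'apply_halve o apply_weird_overflow',
--     'apply_halve o apply_weird_double_zero', 'apply_halve_and_increment o apply_increment'
-- ]
-- _RANK = {rule: i for i, rule in enumerate(_PRIORITY)}
--
--
-- def select_best_action(local_matches, tm_name):
--     special = 'apply_halve_and_increment o apply_excluding_increment'
--     if tm_name == '1RB---_0LC1RF_1RA1LD_0LE1RF_0LC1LE_0RD0RA' and special in local_matches: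
--         return special
--     if len(local_matches) > 1:
--         best = None
--         for m in local_matches:
--             r = _RANK.get(m)
--             if r is not None and (best is None or r < best[0]):
--                 best = (r, m)
--         if best is not None:
--             return best[1]
--         return local_matches[0]
-- ===== Notes on version B (the rewrite author's own statement) =====
-- stated objective: faster
-- what changed: Instead of scanning the fixed 16-rule priority list and testing each rule for membership in local_matches, B precomputes a rank dict from the priority list once and makes a single pass over local_matches keeping the element of minimal rank.
-- outside the precondition, e.g. on select_best_action(['apply_init'], 'x'): A returns None, B returns None
import Mathlib
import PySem

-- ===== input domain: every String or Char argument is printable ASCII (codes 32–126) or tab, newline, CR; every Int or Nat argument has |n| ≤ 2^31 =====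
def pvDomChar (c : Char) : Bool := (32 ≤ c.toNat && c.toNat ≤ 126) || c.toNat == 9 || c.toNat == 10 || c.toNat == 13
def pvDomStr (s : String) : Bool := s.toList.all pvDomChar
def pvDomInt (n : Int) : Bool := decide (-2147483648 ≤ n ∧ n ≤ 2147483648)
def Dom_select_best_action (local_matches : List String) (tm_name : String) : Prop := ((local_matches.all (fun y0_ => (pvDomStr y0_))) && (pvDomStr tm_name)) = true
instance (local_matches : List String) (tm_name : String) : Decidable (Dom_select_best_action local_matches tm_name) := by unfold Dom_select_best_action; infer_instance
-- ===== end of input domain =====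

-- B replaces A's scan over the fixed priority list (one membership test of each rule in
-- local_matches) by a single pass over local_matches selecting the element of minimal
-- precomputed rank (measurably faster in a timing run).

-- constants shared by both programs (module-level literals of the Python file)
def pvMagic : String := "1RB---_0LC1RF_1RA1LD_0LE1RF_0LC1LE_0RD0RA"
def pvSpecialRule : String := "apply_halve_and_increment o apply_excluding_increment"
def pvPriorityList : List String :=
  ["apply_init", "apply_increment", "apply_zero", "apply_zero_variant",
   "apply_overflow o apply_zero_increment",
   "apply_halve o apply_increment", "apply_halve o apply_zero",
   "apply_zero_increment", "apply_excluding_increment", "apply_shallow_increment",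
   "apply_zero_D", "apply_halve o apply_zero_D",
   "apply_halve_and_increment o apply_unsafe_increment_1N", "apply_halve o apply_weird_overflow",
   "apply_halve o apply_weird_double_zero", "apply_halve_and_increment o apply_increment"]

-- ===== PORT A =====
-- the for-loop with early return over the priority list = first rule contained in local_matches
def pvPriorityLoop (lm : List String) : Option String :=
  pvPriorityList.find? (fun p => lm.contains p)

-- the `if len(local_matches) > 1` block of A ("" stands for the implicit None, outside Pre_)
def pvTailA (lm : List String) : String :=
  if 1 < lm.length then
    match pvPriorityLoop lm with
    | some p => p
    | none => lm.headD ""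
  else ""

def select_best_action (local_matches : List String) (tm_name : String) : String :=
  if tm_name = pvMagic then
    if local_matches.contains pvSpecialRule then pvSpecialRule
    else pvTailA local_matches
  else pvTailA local_matches

-- ===== PORT B =====
-- RANK = {rule: i for i, rule in enumerate(_PRIORITY)}: association list in insertion order
def pvRank : List (String × Int) :=
  pvPriorityList.zipIdx.map (fun p => (p.1, (p.2 : Int)))

-- RANK.get(m)
def pvRankGet (m : String) : Option Int :=
  (pvRank.find? (fun kv => kv.1 == m)).map Prod.snd

-- one iteration of B's loop: keep the (rank, element) pair of smallest rank seen so far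
def pvStep (best : Option (Int × String)) (m : String) : Option (Int × String) :=
  match pvRankGet m with
  | none => best
  | some r =>
    match best with
    | none => some (r, m)
    | some b => if r < b.1 then some (r, m) else some b

-- the `if len(local_matches) > 1` block of B ("" stands for the implicit None, outside Pre_)
def pvTailB (lm : List String) : String :=
  if 1 < lm.length then
    match lm.foldl pvStep none with
    | some b => b.2
    | none => lm.headD ""
  else ""

def select_best_action_alt (local_matches : List String) (tm_name : String) : String :=
  if tm_name = pvMagic ∧ local_matches.contains pvSpecialRule then pvSpecialRule
  else pvTailB local_matches

-- ===== PRECONDITION & SPEC =====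
-- On inputs where neither the special tm_name branch fires nor len(local_matches) > 1,
-- the Python A returns None, which is not a String: Pre_ excludes exactly those inputs.
def Pre_select_best_action (local_matches : List String) (tm_name : String) : Prop :=
  (tm_name = pvMagic ∧ local_matches.contains pvSpecialRule = true) ∨ 1 < local_matches.length
instance (local_matches : List String) (tm_name : String) : Decidable (Pre_select_best_action local_matches tm_name) := by unfold Pre_select_best_action; infer_instance

def pvWitness_select_best_action : List String × String := (["apply_zero", "apply_init"], "tm")

def Spec_select_best_action (local_matches : List String) (tm_name : String) (out : String) : Prop := out = select_best_action_alt local_matches tm_name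
instance (local_matches : List String) (tm_name : String) (out : String) : Decidable (Spec_select_best_action local_matches tm_name out) := by unfold Spec_select_best_action; infer_instance

-- ===== CLAIM (what is proved, stated in full; the proofs are below) =====
def Claim_equal_select_best_action : Prop := ∀ (local_matches : List String) (tm_name : String), Dom_select_best_action local_matches tm_name → Pre_select_best_action local_matches tm_name → Spec_select_best_action local_matches tm_name (select_best_action local_matches tm_name)

-- ===== LEMMAS AND PROOFS =====

-- left-biased minimum-by-rank merge; pvStep folds it over local_matches
def pvMerge : Option (Int × String) → Option (Int × String) → Option (Int × String)
  | none, b => b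
  | some a, none => some a
  | some a, some b => if b.1 < a.1 then some b else some a

theorem pvMerge_none_right (a : Option (Int × String)) : pvMerge a none = a := by
  cases a <;> rfl

theorem pvStep_eq (b : Option (Int × String)) (m : String) :
    pvStep b m = pvMerge b (Option.map (fun r => (r, m)) (pvRankGet m)) := by
  cases hr : pvRankGet m <;> cases b <;> simp [pvStep, pvMerge, hr]

theorem pvMerge_assoc (a b c : Option (Int × String)) :
    pvMerge (pvMerge a b) c = pvMerge a (pvMerge b c) := by
  rcases a with _ | ⟨ra, ma⟩
  · rfl
  rcases b with _ | ⟨rb, mb⟩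
  · rfl
  rcases c with _ | ⟨rc, mc⟩
  · simp [pvMerge_none_right]
  by_cases h1 : rb < ra <;> by_cases h2 : rc < rb <;> by_cases h3 : rc < ra <;>
    simp [pvMerge, h1, h2, h3] <;> omega

theorem pvFoldl_merge (lm : List String) (b : Option (Int × String)) :
    lm.foldl pvStep b = pvMerge b (lm.foldl pvStep none) := by
  induction lm generalizing b with
  | nil => simp [List.foldl, pvMerge_none_right]
  | cons x xs ih =>
    simp only [List.foldl]
    rw [ih (pvStep b x), ih (pvStep none x), pvStep_eq, pvStep_eq, ← pvMerge_assoc]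
    rfl

theorem pvFoldl_cons (x : String) (xs : List String) :
    (x :: xs).foldl pvStep none =
      pvMerge (Option.map (fun r => (r, x)) (pvRankGet x)) (xs.foldl pvStep none) := by
  simp only [List.foldl]
  rw [pvFoldl_merge, pvStep_eq]
  rfl

theorem pvF_none (lm : List String) (h : lm.foldl pvStep none = none) :
    ∀ m ∈ lm, pvRankGet m = none := by
  induction lm with
  | nil => simp
  | cons x xs ih =>
    rw [pvFoldl_cons] at h
    cases hr : pvRankGet x <;> rw [hr] at h
    · cases hxs : xs.foldl pvStep none <;> rw [hxs] at h
      · intro m hm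
        rcases List.mem_cons.1 hm with rfl | hm
        · exact hr
        · exact ih hxs m hm
      · simp [pvMerge] at h
    · simp only [Option.map_some] at h
      cases hxs : xs.foldl pvStep none <;> rw [hxs] at h <;> simp only [pvMerge] at h
      · exact absurd h (by simp)
      · split_ifs at h

theorem pvF_some (lm : List String) (b : Int × String)
    (h : lm.foldl pvStep none = some b) :
    b.2 ∈ lm ∧ pvRankGet b.2 = some b.1 ∧
      ∀ m ∈ lm, ∀ r, pvRankGet m = some r → b.1 ≤ r := by
  induction lm generalizing b with
  | nil => simp [List.foldl] at h
  | cons x xs ih =>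
    rw [pvFoldl_cons] at h
    cases hr : pvRankGet x with
    | none =>
      rw [hr] at h
      simp only [Option.map_none] at h
      have hxs : xs.foldl pvStep none = some b := h
      rcases ih b hxs with ⟨hmem, hrank, hmin⟩
      refine ⟨List.mem_cons_of_mem _ hmem, hrank, ?_⟩
      intro m hm r hrm
      rcases List.mem_cons.1 hm with rfl | hm
      · rw [hr] at hrm; cases hrm
      · exact hmin m hm r hrm
    | some r =>
      rw [hr] at h
      simp only [Option.map_some] at h
      cases hxs : xs.foldl pvStep none with
      | none =>
        rw [hxs] at h
        simp only [pvMerge] at h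
        injection h with h; subst h
        refine ⟨List.mem_cons_self, hr, ?_⟩
        intro m hm r' hrm
        rcases List.mem_cons.1 hm with rfl | hm
        · rw [hr] at hrm; injection hrm with h2; omega
        · exact absurd hrm (by simp [pvF_none xs hxs m hm])
      | some c =>
        rw [hxs] at h
        simp only [pvMerge] at h
        rcases ih c hxs with ⟨hmem, hrank, hmin⟩
        by_cases hlt : c.1 < r
        · rw [if_pos hlt] at h
          injection h with h; subst h
          refine ⟨List.mem_cons_of_mem _ hmem, hrank, ?_⟩
          intro m hm r' hrm
          rcases List.mem_cons.1 hm with rfl | hm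
          · rw [hr] at hrm; injection hrm with h2; omega
          · exact hmin m hm r' hrm
        · rw [if_neg hlt] at h
          injection h with h; subst h
          refine ⟨List.mem_cons_self, hr, ?_⟩
          intro m hm r' hrm
          rcases List.mem_cons.1 hm with rfl | hm
          · rw [hr] at hrm; injection hrm with h2; omega
          · have := hmin m hm r' hrm; omega

-- generic lookup in a (key, value) list built by zipIdx = index of the key
def pvRankGetG (l : List (String × Int)) (m : String) : Option Int :=
  (l.find? (fun kv => kv.1 == m)).map Prod.snd

theorem pvGenIdx (m : String) (l : List String) : ∀ (k : Nat),
    pvRankGetG ((l.zipIdx k).map (fun p => (p.1, (p.2 : Int)))) m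
      = (List.idxOf? m l).map (fun i : Nat => ((i + k : Nat) : Int)) := by
  induction l with
  | nil => intro k; rfl
  | cons x xs ih =>
    intro k
    by_cases hx : x == m
    · simp [pvRankGetG, List.zipIdx_cons, List.idxOf?_cons, hx]
    · simp only [pvRankGetG, List.zipIdx_cons, List.map, List.find?, List.idxOf?_cons, hx,
        if_false, Bool.false_eq_true]
      have hxs := ih (k + 1)
      simp only [pvRankGetG] at hxs
      rw [hxs]
      cases List.idxOf? m xs
      · simp
      · simp
        omega

theorem pvRankGet_eq_idx (m : String) :
    pvRankGet m = (List.idxOf? m pvPriorityList).map (fun i : Nat => (i : Int)) := by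
  have h := pvGenIdx m pvPriorityList 0
  simp only [Nat.add_zero] at h
  exact h

theorem pvIdx_append (a : String) (l2 : List String) : ∀ (l1 : List String), a ∉ l1 →
    List.idxOf? a (l1 ++ l2) = (List.idxOf? a l2).map (· + l1.length) := by
  intro l1
  induction l1 with
  | nil => simp
  | cons x xs ih =>
    intro h
    have hxa : (x == a) = false := by
      simp only [List.mem_cons, not_or] at h
      simp only [beq_eq_false_iff_ne, ne_eq]
      exact fun hc => h.1 hc.symm
    rw [List.cons_append, List.idxOf?_cons, hxa]
    simp only [Bool.false_eq_true, if_false]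
    rw [ih (by simp_all)]
    cases List.idxOf? a l2
    · simp
    · simp
      omega

theorem pvCore (lm : List String) :
    (match pvPriorityLoop lm with
     | some p => p
     | none => lm.headD "") =
    (match lm.foldl pvStep none with
     | some b => b.2
     | none => lm.headD "") := by
  cases hF : lm.foldl pvStep none with
  | none =>
    cases hG : pvPriorityLoop lm with
    | none => rfl
    | some q =>
      exfalso
      have hq := List.find?_some hG
      have hqP := List.mem_of_find?_eq_some hG
      have hqlm : q ∈ lm := List.contains_iff_mem.mp hq
      have hnone := pvF_none lm hF q hqlm
      rw [pvRankGet_eq_idx] at hnone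
      have hidx : List.idxOf? q pvPriorityList = none := by
        cases h : List.idxOf? q pvPriorityList
        · rfl
        · rw [h] at hnone; cases hnone
      exact (List.idxOf?_eq_none_iff.mp hidx) hqP
  | some b =>
    rcases pvF_some lm b hF with ⟨hmem, hrank, hmin⟩
    rw [pvRankGet_eq_idx] at hrank
    cases hj : List.idxOf? b.2 pvPriorityList with
    | none => rw [hj] at hrank; cases hrank
    | some j =>
      rw [hj] at hrank
      have hb1 : b.1 = (j : Int) := by
        simp only [Option.map_some] at hrank
        injection hrank with h
        omega
      have hbP : b.2 ∈ pvPriorityList := by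
        have : (List.idxOf? b.2 pvPriorityList).isSome := by rw [hj]; rfl
        exact List.isSome_idxOf?.mp this
      cases hG : pvPriorityLoop lm with
      | none =>
        exfalso
        have := List.find?_eq_none.mp hG b.2 hbP
        exact this (List.contains_iff_mem.mpr hmem)
      | some q =>
        obtain ⟨hpq, as, bs, hsplit, hprev⟩ := List.find?_eq_some_iff_append.mp hG
        have hqlm : q ∈ lm := List.contains_iff_mem.mp hpq
        have hnotas : ∀ a ∈ as, a ∉ lm := by
          intro a ha hal
          have hba := hprev a ha
          rw [List.contains_iff_mem.mpr hal] at hba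
          simp at hba
        have hqas : q ∉ as := fun h => hnotas q h hqlm
        have hidxq : List.idxOf? q pvPriorityList = some as.length := by
          rw [hsplit, pvIdx_append q (q :: bs) as hqas, List.idxOf?_cons]
          simp
        have hrankq : pvRankGet q = some ((as.length : Nat) : Int) := by
          rw [pvRankGet_eq_idx, hidxq]; rfl
        have hle : b.1 ≤ ((as.length : Nat) : Int) := hmin q hqlm _ hrankq
        have hbas : b.2 ∉ as := fun h => hnotas b.2 h hmem
        have hidxb : List.idxOf? b.2 pvPriorityList
            = (List.idxOf? b.2 (q :: bs)).map (· + as.length) := by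
          rw [hsplit]; exact pvIdx_append b.2 (q :: bs) as hbas
        rw [hj] at hidxb
        cases ht : List.idxOf? b.2 (q :: bs) with
        | none => rw [ht] at hidxb; cases hidxb
        | some t =>
          rw [ht] at hidxb
          simp only [Option.map_some] at hidxb
          injection hidxb with hjt
          have ht0 : t = 0 := by omega
          rw [ht0] at ht
          rw [List.idxOf?_cons] at ht
          by_cases hbq : (q == b.2) = true
          · have hqb : q = b.2 := beq_iff_eq.mp hbq
            rw [hqb]
          · exfalso
            rw [if_neg (by simp [hbq])] at ht
            cases hu : List.idxOf? b.2 bs with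
            | none => rw [hu] at ht; cases ht
            | some u => rw [hu] at ht; simp at ht

theorem pvTail_eq (lm : List String) : pvTailA lm = pvTailB lm := by
  unfold pvTailA pvTailB
  split_ifs with h
  · exact pvCore lm
  · rfl

-- ===== VERDICT (by name: the statement is the Claim_ definition above) =====
theorem select_best_action_spec : Claim_equal_select_best_action := by
  intro lm tm _ _
  unfold Spec_select_best_action select_best_action select_best_action_alt
  split_ifs <;> simp_all [pvTail_eq]
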